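-- pv_equiv track=rewrite | github.com/sanketnimbalkar/python-learning | userdefinedfunctions/definingfunction.py | get_phone_count
-- ===== SOURCE A (Python) =====
-- def get_phone_count(employee_id: int, phone_numbers: list):
--     valid_count = 0
--     invalid_count = 0
--     for phone_number in phone_numbers:
--         if len(phone_number) != 10:
--             invalid_count += 1
--         else:
--             valid_count += 1
--     return valid_count, invalid_count
-- ===== SOURCE B (Python) =====
-- def get_phone_count(employee_id: int, phone_numbers: list):
--     # Build a histogram of string lengths, then read the length-10 bucket.
--     hist = {}
--     for p in phone_numbers:
--         n = len(p)
--         hist[n] = hist.get(n, 0) + 1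
--     valid_count = hist.get(10, 0)
--     return valid_count, len(phone_numbers) - valid_count
-- ===== Notes on version B (the rewrite author's own statement) =====
-- stated objective: alternative
-- what changed: B builds a length histogram (dict length -> frequency) in one pass, then reads valid_count from the length-10 bucket and derives invalid_count by subtracting from len(phone_numbers), replacing A's two branch-incremented counters.
import Mathlib
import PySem

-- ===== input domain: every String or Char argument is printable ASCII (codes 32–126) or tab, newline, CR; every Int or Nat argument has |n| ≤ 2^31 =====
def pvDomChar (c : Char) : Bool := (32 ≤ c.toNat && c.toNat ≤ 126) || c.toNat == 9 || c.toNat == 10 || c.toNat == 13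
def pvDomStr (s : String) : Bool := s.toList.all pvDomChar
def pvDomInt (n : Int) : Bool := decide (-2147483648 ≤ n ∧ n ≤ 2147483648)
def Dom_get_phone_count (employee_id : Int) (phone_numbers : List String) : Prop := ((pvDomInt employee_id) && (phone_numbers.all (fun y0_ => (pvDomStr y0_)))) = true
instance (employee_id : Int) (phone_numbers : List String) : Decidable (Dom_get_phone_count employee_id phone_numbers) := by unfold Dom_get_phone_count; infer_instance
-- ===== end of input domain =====

-- B builds a length histogram (dict) and reads the length-10 bucket, deriving the invalid
-- count by subtraction, instead of A's two branch-incremented counters (objective: alternative).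

-- ===== PORT A =====
def get_phone_count (employee_id : Int) (phone_numbers : List String) : Int × Int :=
  let st := phone_numbers.foldl
    (fun (acc : Int × Int) phone_number =>
      if PySem.Str.len phone_number ≠ 10 then (acc.1, acc.2 + 1) else (acc.1 + 1, acc.2))
    (0, 0)
  (st.1, st.2)

-- ===== PORT B =====
def get_phone_count_alt (employee_id : Int) (phone_numbers : List String) : Int × Int :=
  -- hist[n] = hist.get(n, 0) + 1  is exactly Dict.modify n 0 (· + 1)
  let hist : PySem.Dict Int Int := phone_numbers.foldl
    (fun d p => d.modify (PySem.Str.len p) 0 (· + 1)) PySem.Dict.empty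
  let valid_count := hist.getD 10 0
  (valid_count, PySem.List.len phone_numbers - valid_count)

-- ===== PRECONDITION & SPEC =====
def Spec_get_phone_count (employee_id : Int) (phone_numbers : List String) (out : Int × Int) : Prop := out = get_phone_count_alt employee_id phone_numbers
instance (employee_id : Int) (phone_numbers : List String) (out : Int × Int) : Decidable (Spec_get_phone_count employee_id phone_numbers out) := by unfold Spec_get_phone_count; infer_instance

-- ===== CLAIM (what is proved, stated in full; the proofs are below) =====
def Claim_equal_get_phone_count : Prop := ∀ (employee_id : Int) (phone_numbers : List String), Dom_get_phone_count employee_id phone_numbers → Spec_get_phone_count employee_id phone_numbers (get_phone_count employee_id phone_numbers)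

-- ===== LEMMAS AND PROOFS =====
theorem foldl_pair (l : List String) (v i : Int) :
    l.foldl (fun (acc : Int × Int) p =>
      if PySem.Str.len p ≠ 10 then (acc.1, acc.2 + 1) else (acc.1 + 1, acc.2)) (v, i)
    = (v + ((l.filter (fun p => PySem.Str.len p = 10)).length : Int),
       i + ((l.length : Int) - ((l.filter (fun p => PySem.Str.len p = 10)).length : Int))) := by
  induction l generalizing v i with
  | nil => simp
  | cons h t ih =>
    simp only [List.foldl_cons, List.filter_cons]
    by_cases hl : PySem.Str.len h = 10
    · have hl2 : (h.length : Int) = 10 := by simpa using hl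
      rw [if_neg (by simpa using hl), ih]
      simp [hl2, Prod.ext_iff]
      omega
    · have hl2 : ¬ (h.length : Int) = 10 := by simpa using hl
      rw [if_pos (by simpa using hl), ih]
      simp [hl2, Prod.ext_iff]
      omega

theorem hist_bucket (l : List String) :
    (l.foldl (fun (d : PySem.Dict Int Int) p => d.modify (PySem.Str.len p) 0 (· + 1))
        PySem.Dict.empty).getD 10 0
    = ((l.filter (fun p => PySem.Str.len p = 10)).length : Int) := by
  have hmap : (l.foldl (fun (d : PySem.Dict Int Int) p => d.modify (PySem.Str.len p) 0 (· + 1)) PySem.Dict.empty)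
      = ((l.map PySem.Str.len).foldl (fun (d : PySem.Dict Int Int) x => d.modify x 0 (· + 1)) PySem.Dict.empty) := by
    rw [List.foldl_map]
  rw [hmap, PySem.Dict.getD_foldl_modify_add_one]
  simp only [List.count_eq_countP, List.countP_eq_length_filter, List.filter_map]
  have hfil : List.filter ((fun x => x == (10 : Int)) ∘ PySem.Str.len) l
      = List.filter (fun p => decide (PySem.Str.len p = 10)) l := by
    apply List.filter_congr
    intro p _
    exact (Bool.beq_eq_decide_eq _ _)
  rw [hfil]
  simp [PySem.Dict.empty, PySem.Dict.getD, PySem.Dict.get?]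

-- ===== VERDICT (by name: the statement is the Claim_ definition above) =====
theorem get_phone_count_spec : Claim_equal_get_phone_count := by
  intro e l _
  show get_phone_count e l = get_phone_count_alt e l
  unfold get_phone_count get_phone_count_alt
  dsimp only
  rw [foldl_pair, hist_bucket]
  simp [PySem.List.len]
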